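-- pv_equiv track=rewrite | github.com/Edsel-Tan/dashboard | Solutions/175.py | calculate
-- ===== SOURCE A (Python) =====
-- def calculate(sbf):
--     a = 1
--     b = 0
--     for i in range(len(sbf)-1, -1, -1):
--     # while len(sbf) != 0:
--         if i % 2 == 1:
--             b = sbf[i] * a + b
--         else:
--             a = a + sbf[i] * b
--
--     return a, b
-- ===== SOURCE B (Python) =====
-- def _mat(i, s):
--     # elementary matrix of index i: [[1,s],[0,1]] for even i, [[1,0],[s,1]] for odd i
--     return (1, s, 0, 1) if i % 2 == 0 else (1, 0, s, 1)
--
-- def _mmul(p, m):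
--     p00, p01, p10, p11 = p
--     m00, m01, m10, m11 = m
--     return (p00 * m00 + p01 * m10, p00 * m01 + p01 * m11,
--             p10 * m00 + p11 * m10, p10 * m01 + p11 * m11)
--
-- def _prod(sbf, lo, hi):
--     # matrix product M_lo * ... * M_{hi-1} by balanced divide and conquer
--     if hi - lo == 1:
--         return _mat(lo, sbf[lo])
--     mid = (lo + hi) // 2
--     return _mmul(_prod(sbf, lo, mid), _prod(sbf, mid, hi))
--
-- def calculate(sbf):
--     if not sbf:
--         return 1, 0
--     p = _prod(sbf, 0, len(sbf))
--     return p[0], p[2]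
-- ===== Notes on version B (the rewrite author's own statement) =====
-- stated objective: faster
-- what changed: Replaces A's backward scalar loop (state a,b) by a balanced divide-and-conquer product of per-index elementary 2x2 integer matrices, returning the product's first column; balancing lets big-integer multiplication work on similarly sized operands (subquadratic total bit work) instead of A's n multiplications of a huge number by a small one.
import Mathlib
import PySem

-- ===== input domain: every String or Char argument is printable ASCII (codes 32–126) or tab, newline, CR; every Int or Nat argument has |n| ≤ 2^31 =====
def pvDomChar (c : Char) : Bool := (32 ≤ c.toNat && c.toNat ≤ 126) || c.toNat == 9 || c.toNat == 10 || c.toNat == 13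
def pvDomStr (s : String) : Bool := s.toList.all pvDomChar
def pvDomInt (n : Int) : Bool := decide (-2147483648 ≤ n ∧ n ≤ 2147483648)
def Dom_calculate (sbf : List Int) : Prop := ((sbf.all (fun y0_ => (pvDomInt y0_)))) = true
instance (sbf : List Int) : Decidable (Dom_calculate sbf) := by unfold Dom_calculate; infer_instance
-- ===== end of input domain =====

-- B replaces A's backward scalar loop by a balanced divide-and-conquer 2x2 matrix product; the answer is the product's first column.

-- ===== PORT A =====
-- backward index loop over range(len(sbf)-1, -1, -1), state (a, b)
def calculate (sbf : List Int) : Int × Int :=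
  (PySem.List.pyRange ((sbf.length : Int) - 1) (-1) (-1)).foldl
    (fun (st : Int × Int) (i : Int) =>
      if PySem.Int.mod i 2 = 1 then (st.1, PySem.List.pyGetD sbf i 0 * st.1 + st.2)
      else (st.1 + PySem.List.pyGetD sbf i 0 * st.2, st.2))
    (1, 0)

-- ===== PORT B =====
-- _mat(i, s): the elementary matrix of index i, flattened (m00, m01, m10, m11)
def pvMat (i : Int) (s : Int) : Int × Int × Int × Int :=
  if PySem.Int.mod i 2 = 0 then (1, s, 0, 1) else (1, 0, s, 1)

-- _mmul(p, m): 2x2 matrix multiplication on flattened tuples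
def pvMmul (p m : Int × Int × Int × Int) : Int × Int × Int × Int :=
  (p.1 * m.1 + p.2.1 * m.2.2.1, p.1 * m.2.1 + p.2.1 * m.2.2.2,
   p.2.2.1 * m.1 + p.2.2.2 * m.2.2.1, p.2.2.1 * m.2.1 + p.2.2.2 * m.2.2.2)

-- _prod(sbf, lo, hi): product M_lo * ... * M_{hi-1} by balanced divide and conquer.
-- Source B's base test is 'hi - lo == 1'; the '≤ 1' here only makes the recursion total
-- on the unreachable hi ≤ lo calls (calculate_alt only ever calls it with lo < hi).
def pvProd (sbf : List Int) (lo hi : Nat) : Int × Int × Int × Int :=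
  if _h : hi - lo ≤ 1 then pvMat (lo : Int) (PySem.List.pyGetD sbf (lo : Int) 0)
  else
    let mid := (lo + hi) / 2
    pvMmul (pvProd sbf lo mid) (pvProd sbf mid hi)
  termination_by hi - lo
  decreasing_by all_goals omega

def calculate_alt (sbf : List Int) : Int × Int :=
  if sbf = [] then (1, 0)
  else
    let p := pvProd sbf 0 sbf.length
    (p.1, p.2.2.1)

-- ===== PRECONDITION & SPEC =====
def Spec_calculate (sbf : List Int) (out : Int × Int) : Prop := out = calculate_alt sbf
instance (sbf : List Int) (out : Int × Int) : Decidable (Spec_calculate sbf out) := by unfold Spec_calculate; infer_instance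

-- ===== CLAIM (what is proved, stated in full; the proofs are below) =====
def Claim_equal_calculate : Prop := ∀ (sbf : List Int), Dom_calculate sbf → Spec_calculate sbf (calculate sbf)

-- ===== LEMMAS AND PROOFS =====

-- matrix applied to a column vector
def pvApp (m : Int × Int × Int × Int) (v : Int × Int) : Int × Int :=
  (m.1 * v.1 + m.2.1 * v.2, m.2.2.1 * v.1 + m.2.2.2 * v.2)

-- sequential product of the matrices of indices [lo, hi), the common reference point
def pvSeg (sbf : List Int) (lo hi : Nat) : Int × Int × Int × Int :=
  (List.range' lo (hi - lo)).foldl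
    (fun (p : Int × Int × Int × Int) (j : Nat) =>
      pvMmul p (pvMat (j : Int) (PySem.List.pyGetD sbf (j : Int) 0)))
    (1, 0, 0, 1)

theorem pvMmul_one_left (m : Int × Int × Int × Int) : pvMmul (1, 0, 0, 1) m = m := by
  simp [pvMmul]

theorem pvMmul_one_right (m : Int × Int × Int × Int) : pvMmul m (1, 0, 0, 1) = m := by
  simp [pvMmul]

theorem pvMmul_assoc (p q r : Int × Int × Int × Int) :
    pvMmul (pvMmul p q) r = pvMmul p (pvMmul q r) := by
  simp [pvMmul]; refine ⟨by ring, by ring, by ring, by ring⟩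

theorem pvApp_mul (p q : Int × Int × Int × Int) (v : Int × Int) :
    pvApp (pvMmul p q) v = pvApp p (pvApp q v) := by
  simp [pvMmul, pvApp]; constructor <;> ring

-- pulling the start matrix out of a sequential fold
theorem pvFold_mul (sbf : List Int) (l : List Nat) :
    ∀ p : Int × Int × Int × Int,
    l.foldl (fun (p : Int × Int × Int × Int) (j : Nat) =>
        pvMmul p (pvMat (j : Int) (PySem.List.pyGetD sbf (j : Int) 0))) p
      = pvMmul p (l.foldl
          (fun (p : Int × Int × Int × Int) (j : Nat) =>
            pvMmul p (pvMat (j : Int) (PySem.List.pyGetD sbf (j : Int) 0)))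
          (1, 0, 0, 1)) := by
  induction l with
  | nil => intro p; simp [pvMmul_one_right]
  | cons x t ih =>
      intro p
      simp only [List.foldl_cons]
      rw [ih, ih (pvMmul (1, 0, 0, 1) _), pvMmul_one_left, pvMmul_assoc]

theorem pvSeg_single (sbf : List Int) (lo : Nat) :
    pvSeg sbf lo (lo + 1) = pvMat (lo : Int) (PySem.List.pyGetD sbf (lo : Int) 0) := by
  simp [pvSeg, pvMmul_one_left]

theorem pvSeg_split (sbf : List Int) (lo mid hi : Nat) (h1 : lo ≤ mid) (h2 : mid ≤ hi) :
    pvSeg sbf lo hi = pvMmul (pvSeg sbf lo mid) (pvSeg sbf mid hi) := by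
  unfold pvSeg
  have hr : List.range' lo (hi - lo) = List.range' lo (mid - lo) ++ List.range' mid (hi - mid) := by
    have h := (List.range'_append (s := lo) (m := mid - lo) (n := hi - mid) (step := 1)).symm
    rw [show lo + 1 * (mid - lo) = mid by omega, show mid - lo + (hi - mid) = hi - lo by omega] at h
    exact h
  rw [hr, List.foldl_append, pvFold_mul]

-- the divide-and-conquer product equals the sequential product on every nonempty segment
theorem pvProd_eq_seg (sbf : List Int) :
    ∀ (d lo hi : Nat), hi - lo = d → lo < hi → pvProd sbf lo hi = pvSeg sbf lo hi := by
  intro d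
  induction d using Nat.strong_induction_on with
  | _ d ih =>
      intro lo hi hd hlt
      rw [pvProd]
      by_cases hb : hi - lo ≤ 1
      · have hhi : hi = lo + 1 := by omega
        rw [dif_pos hb, hhi, pvSeg_single]
      · rw [dif_neg hb]
        show pvMmul (pvProd sbf lo ((lo + hi) / 2)) (pvProd sbf ((lo + hi) / 2) hi) = pvSeg sbf lo hi
        have h1 : lo < (lo + hi) / 2 := by omega
        have h2 : (lo + hi) / 2 < hi := by omega
        rw [ih ((lo + hi) / 2 - lo) (by omega) lo _ rfl h1,
            ih (hi - (lo + hi) / 2) (by omega) _ hi rfl h2,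
            ← pvSeg_split sbf lo _ hi (by omega) (by omega)]

-- prefix product M_0 · … · M_{k-1}, the shape A's backward loop builds
def pvPmat (sbf : List Int) : Nat → Int × Int × Int × Int
  | 0 => (1, 0, 0, 1)
  | k + 1 => pvMmul (pvPmat sbf k) (pvMat (k : Int) (PySem.List.pyGetD sbf (k : Int) 0))

theorem pvPmat_eq_seg (sbf : List Int) (m : Nat) : pvPmat sbf m = pvSeg sbf 0 m := by
  induction m with
  | zero => simp [pvPmat, pvSeg]
  | succ k ih =>
      rw [pvPmat, ih, pvSeg_split sbf 0 k (k + 1) (by omega) (by omega), pvSeg_single]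

-- A's fold over the countdown range computes the prefix-product matrix applied to the start vector
theorem calcA_app (sbf : List Int) (m : Nat) (v : Int × Int) :
    (PySem.List.pyRange ((m : Int) - 1) (-1) (-1)).foldl
      (fun (st : Int × Int) (i : Int) =>
        if PySem.Int.mod i 2 = 1 then (st.1, PySem.List.pyGetD sbf i 0 * st.1 + st.2)
        else (st.1 + PySem.List.pyGetD sbf i 0 * st.2, st.2))
      v = pvApp (pvPmat sbf m) v := by
  induction m generalizing v with
  | zero =>
      rw [PySem.List.pyRange_neg_one_eq_nil (by omega)]
      simp [pvPmat, pvApp]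
  | succ k ih =>
      have hc : PySem.List.pyRange ((↑(k + 1) : Int) - 1) (-1) (-1)
          = ((k : Int)) :: PySem.List.pyRange ((k : Int) - 1) (-1) (-1) := by
        have := PySem.List.pyRange_neg_one_cons (a := ((k + 1 : Nat) : Int) - 1) (b := -1) (by push_cast; omega)
        simpa using this
      rw [hc]
      simp only [List.foldl_cons]
      rw [ih]
      show pvApp (pvPmat sbf k) _ = pvApp (pvPmat sbf (k + 1)) v
      rw [pvPmat, pvApp_mul]
      congr 1
      have hm : PySem.Int.mod (k : Int) 2 = (k : Int) % 2 :=
        PySem.Int.mod_eq_emod_of_pos (by omega)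
      rw [pvMat, hm]
      by_cases h : ((k : Int)) % 2 = 0 <;> simp [pvApp, h]

-- ===== VERDICT (by name: the statement is the Claim_ definition above) =====
theorem calculate_spec : Claim_equal_calculate := by
  intro sbf _
  show calculate sbf = calculate_alt sbf
  rw [calculate, calculate_alt, calcA_app sbf sbf.length (1, 0)]
  by_cases hnil : sbf = []
  · subst hnil
    simp [pvPmat, pvApp]
  · rw [if_neg hnil]
    have hlen : 0 < sbf.length := List.length_pos_iff.mpr hnil
    rw [pvPmat_eq_seg, ← pvProd_eq_seg sbf sbf.length 0 sbf.length rfl hlen]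
    simp [pvApp]
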